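-- pv_equiv track=rewrite | github.com/phantomdelux3/gem-scrape | gem_extract.py | sanitize_double_digits
-- ===== SOURCE A (Python) =====
-- def sanitize_double_digits(s: str) -> str:
--     """
--     Collapses doubled digits pattern often found in bold PDF text.
--     e.g. '33662200' -> '3620'
--     Condition: Even length, and s[2i] == s[2i+1] for all i.
--     """
--     if not s or len(s) < 2 or len(s) % 2 != 0:
--         return s
--     # Check if only digits (or standard floats) - this function expects raw digit string usually
--     # But let's be strict: if it looks like a "double artifact", collapse it.
--
--     is_artifact = True
--     for i in range(0, len(s), 2):
--         if s[i] != s[i+1]: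
--             is_artifact = False
--             break
--
--     if is_artifact:
--         return s[::2]
--     return s
-- ===== SOURCE B (Python) =====
-- def sanitize_double_digits(s: str) -> str:
--     """
--     Collapses doubled digits pattern often found in bold PDF text.
--     Same guards as the original; then one linear pass with a toggle:
--     pair up consecutive characters, bail out to s on the first mismatch,
--     otherwise emit one character per matching pair.
--     """
--     if not s or len(s) < 2 or len(s) % 2 != 0:
--         return s
--     half = []
--     prev = None
--     for c in s:
--         if prev is None:
--             prev = c
--         elif prev != c:
--             return s
--         else:
--             half.append(c)
--             prev = None
--     return ''.join(half)
-- ===== Notes on version B (the rewrite author's own statement) =====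
-- stated objective: alternative
-- what changed: Replaces the stride-2 index loop with boolean flag plus a final extended slice s[::2] by a single linear pass over the characters with a one-element toggle buffer that simultaneously checks each pair and builds the collapsed output, returning early on the first mismatch.
import Mathlib
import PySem

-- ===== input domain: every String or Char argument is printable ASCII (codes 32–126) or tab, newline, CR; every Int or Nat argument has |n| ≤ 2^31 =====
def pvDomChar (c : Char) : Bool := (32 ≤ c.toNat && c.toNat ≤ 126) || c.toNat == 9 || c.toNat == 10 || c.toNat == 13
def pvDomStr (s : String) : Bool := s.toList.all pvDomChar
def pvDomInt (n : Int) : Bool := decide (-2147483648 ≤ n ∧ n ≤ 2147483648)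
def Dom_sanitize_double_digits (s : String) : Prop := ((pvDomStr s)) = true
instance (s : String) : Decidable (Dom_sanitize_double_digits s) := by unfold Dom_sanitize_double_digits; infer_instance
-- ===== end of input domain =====

-- B replaces A's stride-2 index loop + extended slice s[::2] by one linear pass with a
-- one-element toggle buffer that checks each pair and builds the collapsed output as it goes.

-- ===== PORT A =====
-- the 'for i in range(0, len(s), 2): if s[i] != s[i+1]: is_artifact = False; break' loop,
-- with the break rendered as immediate return of false; the indices i and i+1 produced by the
-- range are in bounds under the even-length guard, so pyGetD's default is never consulted.
def pvGoA (cs : List Char) : List Int → Bool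
  | [] => true
  | i :: rest =>
      if PySem.List.pyGetD cs i ' ' ≠ PySem.List.pyGetD cs (i + 1) ' ' then false
      else pvGoA cs rest

def sanitize_double_digits (s : String) : String :=
  let cs := s.toList
  if cs.isEmpty || cs.length < 2 || PySem.Int.mod (cs.length : Int) 2 ≠ 0 then s
  else if pvGoA cs (PySem.List.pyRange 0 (cs.length : Int) 2) then
    String.ofList ((PySem.List.slice? cs none none 2).getD [])
  else s

-- ===== PORT B =====
-- the 'for c in s' loop with state (prev, half); 'return s' on a mismatch is rendered as none.
def pvGoB : List Char → Option Char → List Char → Option (List Char)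
  | [], _, half => some half
  | c :: t, none, half => pvGoB t (some c) half
  | c :: t, some p, half => if p ≠ c then none else pvGoB t none (half ++ [c])

def sanitize_double_digits_alt (s : String) : String :=
  let cs := s.toList
  if cs.isEmpty || cs.length < 2 || PySem.Int.mod (cs.length : Int) 2 ≠ 0 then s
  else
    match pvGoB cs none [] with
    | none => s
    | some half => String.ofList half

-- ===== PRECONDITION & SPEC =====
def Spec_sanitize_double_digits (s : String) (out : String) : Prop := out = sanitize_double_digits_alt s
instance (s : String) (out : String) : Decidable (Spec_sanitize_double_digits s out) := by unfold Spec_sanitize_double_digits; infer_instance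

-- ===== CLAIM (what is proved, stated in full; the proofs are below) =====
def Claim_equal_sanitize_double_digits : Prop := ∀ (s : String), Dom_sanitize_double_digits s → Spec_sanitize_double_digits s (sanitize_double_digits s)

-- ===== LEMMAS AND PROOFS =====

-- proof-only: the collapsed string, as a structural pair recursion (none = some pair mismatches)
def pvDD : List Char → Option (List Char)
  | [] => some []
  | [_] => none
  | a :: b :: t => if a = b then (pvDD t).map (a :: ·) else none

lemma pvRange_two_cons (a b : Int) (h : a < b) :
    PySem.List.pyRange a b 2 = a :: PySem.List.pyRange (a + 2) b 2 := by
  rw [PySem.List.pyRange_of_pos a b (by norm_num), PySem.List.pyRange_of_pos (a+2) b (by norm_num)]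
  have hc : ((b - a + 2 - 1) / 2).toNat = (if a + 2 < b then ((b - (a+2) + 2 - 1) / 2).toNat else 0) + 1 := by
    split <;> omega
  rw [if_pos h, hc, List.range_succ_eq_map, List.map_cons, List.map_map]
  refine List.cons_eq_cons.mpr ⟨by ring_nf, List.map_congr_left fun k _ => ?_⟩
  simp [Nat.succ_eq_add_one]
  ring

lemma pvGetD_cons2 (x y : Char) (t : List Char) (i : Int) (h : 0 ≤ i) :
    PySem.List.pyGetD (x :: y :: t) (i + 2) ' ' = PySem.List.pyGetD t i ' ' := by
  rw [PySem.List.pyGetD_of_nonneg _ _ (by omega : (0:Int) ≤ i + 2), PySem.List.pyGetD_of_nonneg _ _ h]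
  have h2 : (i+2).toNat = i.toNat + 2 := by omega
  simp [h2]

lemma pvGoA_shift (a b : Char) (t : List Char) (is : List Int) (h : ∀ i ∈ is, 0 ≤ i) :
    pvGoA (a :: b :: t) (is.map (· + 2)) = pvGoA t is := by
  induction is with
  | nil => rfl
  | cons i r ih =>
    have hi : 0 ≤ i := h i (by simp)
    simp only [List.map_cons, pvGoA]
    rw [pvGetD_cons2 a b t i hi]
    have : i + 2 + 1 = (i + 1) + 2 := by ring
    rw [this, pvGetD_cons2 a b t (i+1) (by omega)]
    rw [ih (fun j hj => h j (by simp [hj]))]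

lemma pvRange_shift (l : Int) :
    PySem.List.pyRange 2 (l + 2) 2 = (PySem.List.pyRange 0 l 2).map (· + 2) := by
  rw [PySem.List.pyRange_of_pos 2 (l+2) (by norm_num), PySem.List.pyRange_of_pos 0 l (by norm_num)]
  have hc : (if (2:Int) < l + 2 then ((l + 2 - 2 + 2 - 1) / 2).toNat else 0)
      = (if (0:Int) < l then ((l - 0 + 2 - 1) / 2).toNat else 0) := by split <;> split <;> omega
  rw [hc, List.map_map]
  exact List.map_congr_left fun k _ => by simp; ring

lemma pvGetD_zero (x : Char) (t : List Char) : PySem.List.pyGetD (x :: t) 0 ' ' = x := by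
  rw [PySem.List.pyGetD_of_nonneg _ _ le_rfl]; rfl

lemma pvGetD_one (x y : Char) (t : List Char) : PySem.List.pyGetD (x :: y :: t) 1 ' ' = y := by
  rw [PySem.List.pyGetD_of_nonneg _ _ (by norm_num : (0:Int) ≤ 1)]; rfl

lemma pvGoA_eq_dd : ∀ (cs : List Char), cs.length % 2 = 0 →
    (pvGoA cs (PySem.List.pyRange 0 (cs.length : Int) 2) = true ↔ (pvDD cs).isSome) := by
  intro cs
  induction cs using pvDD.induct with
  | case1 => intro _; decide
  | case2 x => intro h; simp at h
  | case3 b t ih =>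
    intro h
    have ht : t.length % 2 = 0 := by simp at h; omega
    have hlen : ((b :: b :: t).length : Int) = (t.length : Int) + 2 := by simp; ring
    rw [hlen, pvRange_two_cons 0 _ (by omega)]
    rw [(by norm_num : (0:Int) + 2 = 2), pvRange_shift]
    simp only [pvGoA, zero_add, pvGetD_zero, pvGetD_one]
    rw [pvGoA_shift b b t _ (fun i hi =>
      ((PySem.List.mem_pyRange_iff_of_pos (by norm_num) i).mp hi).1)]
    rw [if_neg (by simp)]
    rw [ih ht]
    simp [pvDD]
  | case4 a b t hab =>
    intro h
    have hlen : ((a :: b :: t).length : Int) = (t.length : Int) + 2 := by simp; ring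
    rw [hlen, pvRange_two_cons 0 _ (by omega)]
    simp only [pvGoA, zero_add, pvGetD_zero, pvGetD_one]
    rw [if_pos (by simpa using hab)]
    simp [pvDD, hab]

lemma pvSlice_cons2 (a b : Char) (t : List Char) :
    PySem.List.slice? (a :: b :: t) none none 2 = (PySem.List.slice? t none none 2).map (a :: ·) := by
  simp only [PySem.List.slice?, PySem.List.sliceIndices]
  norm_num
  have hc : (if (0:Int) ≤ (t.length:Int) + 1 then (((t.length:Int) + 1 + 1 + 2 - 1) / 2).toNat else 0)
      = (if 0 < t.length then (((t.length:Int) + 2 - 1) / 2).toNat else 0) + 1 := by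
    split <;> split <;> omega
  rw [hc, List.range_succ_eq_map, List.filterMap_cons, List.filterMap_map]
  have h0 : ((2 * ((0:Nat):Int)).toNat) = 0 := by simp
  simp only [h0]
  rw [List.getElem?_cons_zero]
  congr 1

lemma pvSlice_dd : ∀ (cs : List Char) (h : List Char), pvDD cs = some h →
    PySem.List.slice? cs none none 2 = some h := by
  intro cs
  induction cs using pvDD.induct with
  | case1 => intro h hh; simp [pvDD] at hh; subst hh; decide
  | case2 x => intro h hh; simp [pvDD] at hh
  | case3 b t ih =>
    intro h hh
    simp only [pvDD] at hh
    obtain ⟨h', hh', rfl⟩ := Option.map_eq_some_iff.mp hh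
    rw [pvSlice_cons2, ih h' hh']
    rfl
  | case4 a b t hab =>
    intro h hh
    simp [pvDD, hab] at hh

lemma pvGoB_eq_dd : ∀ (cs : List Char) (acc : List Char), cs.length % 2 = 0 →
    pvGoB cs none acc = (pvDD cs).map (acc ++ ·) := by
  intro cs
  induction cs using pvDD.induct with
  | case1 => intro acc _; simp [pvGoB, pvDD]
  | case2 x => intro acc h; simp at h
  | case3 b t ih =>
    intro acc h
    have ht : t.length % 2 = 0 := by simp at h; omega
    simp only [pvGoB, pvDD, if_neg (by simp : ¬ b ≠ b)]
    rw [ih (acc ++ [b]) ht]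
    cases pvDD t <;> simp

  | case4 a b t hab =>
    intro acc _
    simp only [pvGoB, pvDD, if_pos hab, if_neg hab]
    rfl

-- ===== VERDICT (by name: the statement is the Claim_ definition above) =====
theorem sanitize_double_digits_spec : Claim_equal_sanitize_double_digits := by
  intro s _
  unfold Spec_sanitize_double_digits sanitize_double_digits sanitize_double_digits_alt
  set cs := s.toList with hcs
  by_cases hg : cs.isEmpty || cs.length < 2 || PySem.Int.mod (cs.length : Int) 2 ≠ 0
  · simp only [hg, if_true]
  · simp only [hg]
    have hmod : cs.length % 2 = 0 := by
      simp only [Bool.or_eq_true, not_or, decide_eq_true_eq] at hg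
      have h2 := hg.2
      rw [PySem.Int.mod_eq_emod_of_pos (by norm_num)] at h2
      omega
    rw [pvGoB_eq_dd cs [] hmod]
    by_cases hdd : (pvDD cs).isSome
    · obtain ⟨hl, hh⟩ := Option.isSome_iff_exists.mp hdd
      rw [if_pos ((pvGoA_eq_dd cs hmod).mpr hdd), pvSlice_dd cs hl hh, hh]
      simp
    · rw [if_neg (fun hc => hdd ((pvGoA_eq_dd cs hmod).mp hc))]
      rw [Option.not_isSome_iff_eq_none.mp hdd]
      rfl
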